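-- pv_equiv track=rewrite | github.com/nicolashernandezd2/Tarea-7-Dalgo | knigtMetric.py | approxMTSP
-- ===== SOURCE A (Python) =====
-- from collections import deque, defaultdict
-- import heapq
--
-- def knightMetric(p, q):
--     """
--     Retorna el mínimo número de movimientos de caballo para ir del punto p al punto q.
--     """
--     if p == q:
--         return 0
--
--     moves = [
--         (2, 1), (1, 2), (-1, 2), (-2, 1),
--         (-2, -1), (-1, -2), (1, -2), (2, -1)
--     ]
--
--     visited = set()
--     queue = deque([(p[0], p[1], 0)])
--     visited.add(p)
--
--     while queue:
--         x, y, dist = queue.popleft()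
--         for dx, dy in moves:
--             nx, ny = x + dx, y + dy
--             if (nx, ny) == q:
--                 return dist + 1
--             if (nx, ny) not in visited:
--                 visited.add((nx, ny))
--                 queue.append((nx, ny, dist + 1))
--     return -1  # En teoría nunca pasa porque un caballo puede llegar a cualquier casilla
--
-- def build_complete_graph(points):
--     """
--     Construye un grafo completo ponderado usando la métrica del caballo.
--     """
--     n = len(points)
--     graph = defaultdict(list)
--     for i in range(n):
--         for j in range(i + 1, n):
--             d = knightMetric(points[i], points[j])
--             graph[i].append((j, d))
--             graph[j].append((i, d))
--     return graph
--
-- def prim_mst(graph, n):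
--     """
--     Construye un árbol de expansión mínima (MST) usando el algoritmo de Prim.
--     """
--     mst = defaultdict(list)
--     visited = set()
--     min_heap = [(0, 0, -1)]  # (costo, nodo, padre)
--
--     while len(visited) < n:
--         cost, u, parent = heapq.heappop(min_heap)
--         if u in visited:
--             continue
--         visited.add(u)
--         if parent != -1:
--             mst[parent].append(u)
--             mst[u].append(parent)
--         for v, w in graph[u]:
--             if v not in visited:
--                 heapq.heappush(min_heap, (w, v, u))
--     return mst
--
-- def dfs_mst(mst, start, visited, path):
--     """
--     Recorrido DFS sobre el MST para construir el ciclo TSP.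
--     """
--     visited.add(start)
--     path.append(start)
--     for neighbor in mst[start]:
--         if neighbor not in visited:
--             dfs_mst(mst, neighbor, visited, path)
--
-- def approxMTSP(points):
--     """
--     Algoritmo aproximado para el problema del TSP múltiple (MTSP),
--     usando MST + DFS con la métrica del caballo.
--     """
--     n = len(points)
--     graph = build_complete_graph(points)
--     mst = prim_mst(graph, n)
--
--     visited = set()
--     path = []
--     dfs_mst(mst, 0, visited, path)
--
--     return [points[i] for i in path + [path[0]]]  # ciclo en coordenadas
-- ===== SOURCE B (Python) =====
-- from collections import deque
--
--
-- def knightMetric(p, q):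
--     """
--     Retorna el minimo numero de movimientos de caballo para ir del punto p al punto q.
--     """
--     if p == q:
--         return 0
--
--     moves = [
--         (2, 1), (1, 2), (-1, 2), (-2, 1),
--         (-2, -1), (-1, -2), (1, -2), (2, -1)
--     ]
--
--     visited = set()
--     queue = deque([(p[0], p[1], 0)])
--     visited.add(p)
--
--     while queue:
--         x, y, dist = queue.popleft()
--         for dx, dy in moves:
--             nx, ny = x + dx, y + dy
--             if (nx, ny) == q:
--                 return dist + 1
--             if (nx, ny) not in visited:
--                 visited.add((nx, ny))
--                 queue.append((nx, ny, dist + 1))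
--     return -1
--
--
-- def dfs_mst(mst, start, visited, path):
--     """DFS sobre el arbol para construir el ciclo."""
--     visited.add(start)
--     path.append(start)
--     for neighbor in mst.get(start, []):
--         if neighbor not in visited:
--             dfs_mst(mst, neighbor, visited, path)
--
--
-- def approxMTSP(points):
--     """
--     MST + DFS con la metrica del caballo, pero el MST se construye con un
--     Prim de arreglos O(n^2) (sin heap, sin grafo de adyacencia explicito):
--     para cada nodo fuera del arbol se mantiene la mejor arista (costo, padre)
--     lexicograficamente minima hacia el arbol.
--     """
--     n = len(points)
--     # cada distancia de caballo se calcula una sola vez, por par no ordenado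
--     dist = {}
--     for i in range(n):
--         for j in range(i + 1, n):
--             dist[(i, j)] = knightMetric(points[i], points[j])
--
--     def w(u, v):
--         return dist[(u, v)] if u < v else dist[(v, u)]
--
--     intree = {0}
--     best = {}   # v -> (costo, padre) minimo lexicografico sobre los nodos del arbol
--     mst = {}
--     last = 0
--     for _ in range(1, n):
--         # relajar con el ultimo nodo agregado
--         for v in range(n):
--             if v not in intree:
--                 c = (w(last, v), last)
--                 if v not in best or c < best[v]:
--                     best[v] = c
--         # elegir el nodo fuera del arbol con (costo, indice) minimo
--         u = -1
--         for v in range(n):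
--             if v not in intree and (u == -1 or best[v][0] < best[u][0]):
--                 u = v
--         intree.add(u)
--         p = best[u][1]
--         mst[p] = mst.get(p, []) + [u]
--         mst[u] = mst.get(u, []) + [p]
--         last = u
--
--     visited = set()
--     path = []
--     dfs_mst(mst, 0, visited, path)
--
--     return [points[i] for i in path + [path[0]]]
-- ===== Notes on version B (the rewrite author's own statement) =====
-- stated objective: alternative
-- what changed: The MST construction is rebuilt: A's lazy-deletion heap Prim over an explicit complete adjacency-list graph (heapq with stale entries, defaultdict of neighbour lists) is replaced by an O(n^2) array-style Prim that keeps, for every node outside the tree, the lexicographically least (cost, parent) edge in a dict and relaxes only against the last node added, with knight distances stored once per unordered pair; the knight-metric BFS and the recursive DFS walk are unchanged.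
import Mathlib
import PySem

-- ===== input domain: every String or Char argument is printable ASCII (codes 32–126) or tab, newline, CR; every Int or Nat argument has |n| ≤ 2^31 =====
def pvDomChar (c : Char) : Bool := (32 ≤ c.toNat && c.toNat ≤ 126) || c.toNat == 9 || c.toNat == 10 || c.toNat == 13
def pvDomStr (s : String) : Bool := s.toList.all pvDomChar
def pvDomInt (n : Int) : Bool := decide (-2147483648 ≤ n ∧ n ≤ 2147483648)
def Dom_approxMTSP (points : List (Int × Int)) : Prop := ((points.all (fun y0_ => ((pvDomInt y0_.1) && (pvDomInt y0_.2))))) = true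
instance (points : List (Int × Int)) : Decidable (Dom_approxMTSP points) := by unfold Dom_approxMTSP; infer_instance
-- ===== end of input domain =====

-- B replaces the lazy-heap Prim over an explicit complete adjacency graph by an array-style Prim
-- (best (cost, parent) edge per non-tree node, distances stored once per unordered pair);
-- the knight-metric BFS and the DFS tree walk are the same code in both programs.

-- ===== PORT A =====
-- helpers shared by both ports: this code is line-for-line identical in Source A and Source B
-- (knightMetric and the recursive DFS walk), so one transliteration serves both.

def kmMoves : List (Int × Int) := [(2,1),(1,2),(-1,2),(-2,1),(-2,-1),(-1,-2),(1,-2),(2,-1)]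

-- inner 'for dx, dy in moves' loop of knightMetric: returns (early return value, visited, new queue-back);
-- Python's hash set `visited` is ported as Std.HashSet (only membership/insert are used, never its order),
-- and the deque as a two-list FIFO queue whose back is kept reversed (append = cons)
def kmInner (q : Int × Int) (x y dist : Int) :
    List (Int × Int) → Std.HashSet (Int × Int) → List (Int × Int × Int) →
    Option Int × Std.HashSet (Int × Int) × List (Int × Int × Int)
  | [], vis, backRev => (none, vis, backRev)
  | m :: ms, vis, backRev =>
    if (x + m.1, y + m.2) = q then (some (dist + 1), vis, backRev)
    else if vis.contains (x + m.1, y + m.2) then kmInner q x y dist ms vis backRev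
    else kmInner q x y dist ms (vis.insert (x + m.1, y + m.2)) ((x + m.1, y + m.2, dist + 1) :: backRev)

-- 'while queue' BFS loop; the fuel only makes the recursion total (Python's loop has no bound)
def kmLoop (q : Int × Int) : Nat → List (Int × Int × Int) → List (Int × Int × Int) →
    Std.HashSet (Int × Int) → Int
  | 0, _, _, _ => -1
  | fuel + 1, front, backRev, vis =>
    match front with
    | e :: f =>
      (match kmInner q e.1 e.2.1 e.2.2 kmMoves vis backRev with
       | (some r, _, _) => r
       | (none, vis', back') => kmLoop q fuel f back' vis')
    | [] =>
      match backRev.reverse with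
      | [] => -1
      | e :: f =>
        match kmInner q e.1 e.2.1 e.2.2 kmMoves vis [] with
        | (some r, _, _) => r
        | (none, vis', back') => kmLoop q fuel f back' vis'

def knightMetric (p q : Int × Int) : Int :=
  if p = q then 0
  else kmLoop q 18446744073709551616 [(p.1, p.2, 0)] [] (Std.HashSet.emptyWithCapacity.insert p)

-- recursive dfs_mst (identical in both programs); the fuel bounds the recursion depth,
-- which never exceeds the number of tree nodes
def dfsMst (mst : PySem.Dict Int (List Int)) :
    Nat → Int → PySem.Set Int × List Int → PySem.Set Int × List Int
  | 0, _, st => st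
  | fuel + 1, start, st =>
    (mst.getD start []).foldl
      (fun st2 nb => if PySem.Set.contains st2.1 nb then st2 else dfsMst mst fuel nb st2)
      (PySem.Set.add st.1 start, st.2 ++ [start])

-- A-only helpers: heapq on tuples pops the lexicographically least triple; the heap is
-- ported by its contract, a pool whose pop returns the minimum and the rest.
def pyLexLt3 (a b : Int × Int × Int) : Bool :=
  a.1 < b.1 || (a.1 == b.1 && (a.2.1 < b.2.1 || (a.2.1 == b.2.1 && a.2.2 < b.2.2)))

def popMin? : List (Int × Int × Int) → Option ((Int × Int × Int) × List (Int × Int × Int))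
  | [] => none
  | x :: xs =>
    match popMin? xs with
    | none => some (x, [])
    | some (m, rest) => if pyLexLt3 m x then some (m, x :: rest) else some (x, xs)

-- build_complete_graph: defaultdict(list) with graph[i].append((j, d)); graph[j].append((i, d));
-- points[i] is ported with pyGetD: the indices come from range(n) and are always in range
def buildGraph (points : List (Int × Int)) : PySem.Dict Int (List (Int × Int)) :=
  let n : Int := (points.length : Int)
  (PySem.List.pyRange 0 n).foldl (fun g i =>
    (PySem.List.pyRange (i + 1) n).foldl (fun g j =>
      let d := knightMetric (PySem.List.pyGetD points i (0, 0)) (PySem.List.pyGetD points j (0, 0))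
      (g.modify i [] (· ++ [(j, d)])).modify j [] (· ++ [(i, d)])) g)
    PySem.Dict.empty

-- prim_mst's while loop; heappop on an empty heap (Python IndexError) cannot be reached
-- while len(visited) < n, the 'none' branch is only a totality guard, as is the fuel
def primLoop (graph : PySem.Dict Int (List (Int × Int))) (n : Int) :
    Nat → List (Int × Int × Int) → PySem.Set Int → PySem.Dict Int (List Int) → PySem.Dict Int (List Int)
  | 0, _, _, mst => mst
  | fuel + 1, pool, vis, mst =>
    if PySem.Set.len vis < n then
      match popMin? pool with
      | none => mst
      | some (e, pool') =>
        if PySem.Set.contains vis e.2.1 then primLoop graph n fuel pool' vis mst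
        else
          let u := e.2.1
          let vis' := PySem.Set.add vis u
          let mst' := if e.2.2 != -1 then (mst.modify e.2.2 [] (· ++ [u])).modify u [] (· ++ [e.2.2]) else mst
          let pool'' := (graph.getD u []).foldl
              (fun p vw => if PySem.Set.contains vis' vw.1 then p else p ++ [(vw.2, vw.1, u)]) pool'
          primLoop graph n fuel pool'' vis' mst'
    else mst

-- the loop pops at most 1 + n*n times (one initial entry, at most n pushes per visited node)
def primMst (graph : PySem.Dict Int (List (Int × Int))) (n : Int) : PySem.Dict Int (List Int) :=
  primLoop graph n (n.toNat * n.toNat + n.toNat + 2) [(0, 0, -1)] PySem.Set.empty PySem.Dict.empty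

-- path[0] / points[i]: ported with pyGetD; on Pre_ (points ≠ []) every index is in range,
-- on [] Python raises IndexError (excluded by Pre_)
def approxMTSP (points : List (Int × Int)) : List (Int × Int) :=
  let n : Int := (points.length : Int)
  let graph := buildGraph points
  let mst := primMst graph n
  let path := (dfsMst mst (n.toNat + 1) 0 (PySem.Set.empty, [])).2
  (path ++ [PySem.List.pyGetD path 0 0]).map (fun i => PySem.List.pyGetD points i (0, 0))

-- ===== PORT B =====
-- dist[(i, j)] = knightMetric(points[i], points[j]) for i < j, computed once per unordered pair
def distTable (points : List (Int × Int)) : PySem.Dict (Int × Int) Int :=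
  let n : Int := (points.length : Int)
  (PySem.List.pyRange 0 n).foldl (fun d i =>
    (PySem.List.pyRange (i + 1) n).foldl (fun d j =>
      d.insert (i, j) (knightMetric (PySem.List.pyGetD points i (0, 0)) (PySem.List.pyGetD points j (0, 0)))) d)
    PySem.Dict.empty

-- w(u, v): dist[(min,max)]; the key is always present for the queried pairs, so getD is exact
def wOf (dist : PySem.Dict (Int × Int) Int) (u v : Int) : Int :=
  if u < v then dist.getD (u, v) 0 else dist.getD (v, u) 0

def pyPairLt (a b : Int × Int) : Bool := a.1 < b.1 || (a.1 == b.1 && a.2 < b.2)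

-- 'for v in range(n): if v not in intree: ... best[v] = c'
def relaxB (dist : PySem.Dict (Int × Int) Int) (n : Int) (intree : PySem.Set Int) (last : Int)
    (best : PySem.Dict Int (Int × Int)) : PySem.Dict Int (Int × Int) :=
  (PySem.List.pyRange 0 n).foldl (fun b v =>
    if PySem.Set.contains intree v then b
    else
      if !b.contains v || pyPairLt (wOf dist last v, last) (b.getD v (0, 0)) then
        b.insert v (wOf dist last v, last)
      else b) best

-- 'u = -1; for v in range(n): if v not in intree and (u == -1 or best[v][0] < best[u][0]): u = v'
def selectB (n : Int) (intree : PySem.Set Int) (best : PySem.Dict Int (Int × Int)) : Int :=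
  (PySem.List.pyRange 0 n).foldl (fun u v =>
    if !PySem.Set.contains intree v && (u == -1 || (best.getD v (0, 0)).1 < (best.getD u (0, 0)).1)
    then v else u) (-1)

-- one iteration of B's 'for _ in range(1, n)' loop; state = (intree, best, mst, last)
def primStepB (dist : PySem.Dict (Int × Int) Int) (n : Int)
    (st : PySem.Set Int × PySem.Dict Int (Int × Int) × PySem.Dict Int (List Int) × Int) :
    PySem.Set Int × PySem.Dict Int (Int × Int) × PySem.Dict Int (List Int) × Int :=
  let best := relaxB dist n st.1 st.2.2.2 st.2.1
  let u := selectB n st.1 best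
  let p := (best.getD u (0, 0)).2
  let mst := st.2.2.1.insert p (st.2.2.1.getD p [] ++ [u])
  let mst2 := mst.insert u (mst.getD u [] ++ [p])
  (PySem.Set.add st.1 u, best, mst2, u)

def approxMTSP_alt (points : List (Int × Int)) : List (Int × Int) :=
  let n : Int := (points.length : Int)
  let dist := distTable points
  let st := (PySem.List.pyRange 1 n).foldl (fun st _ => primStepB dist n st)
      (PySem.Set.add PySem.Set.empty 0, PySem.Dict.empty, PySem.Dict.empty, (0 : Int))
  let path := (dfsMst st.2.2.1 (n.toNat + 1) 0 (PySem.Set.empty, [])).2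
  (path ++ [PySem.List.pyGetD path 0 0]).map (fun i => PySem.List.pyGetD points i (0, 0))

-- ===== PRECONDITION & SPEC =====
-- Pre_ excludes only the empty list, on which A raises IndexError (path[0] of the DFS result).
def Pre_approxMTSP (points : List (Int × Int)) : Prop := points ≠ []
instance (points : List (Int × Int)) : Decidable (Pre_approxMTSP points) := by
  unfold Pre_approxMTSP; infer_instance

def pvWitness_approxMTSP : (List (Int × Int)) := [(0, 0), (1, 2), (5, 5)]

def Spec_approxMTSP (points : List (Int × Int)) (out : List (Int × Int)) : Prop := out = approxMTSP_alt points
instance (points : List (Int × Int)) (out : List (Int × Int)) : Decidable (Spec_approxMTSP points out) := by unfold Spec_approxMTSP; infer_instance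

-- ===== CLAIM (what is proved, stated in full; the proofs are below) =====
def Claim_equal_approxMTSP : Prop := ∀ (points : List (Int × Int)), Dom_approxMTSP points → Pre_approxMTSP points → Spec_approxMTSP points (approxMTSP points)

-- ===== LEMMAS AND PROOFS =====

-- ---------- proof-only abbreviations ----------

-- weight of the edge {i, j} as both programs compute it (knightMetric of the two points)
def Wfun (points : List (Int × Int)) (i j : Int) : Int :=
  knightMetric (PySem.List.pyGetD points i (0, 0)) (PySem.List.pyGetD points j (0, 0))

def Wsym (points : List (Int × Int)) (u v : Int) : Int :=
  if u < v then Wfun points u v else Wfun points v u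

def pminP (a b : Int × Int) : Int × Int := if pyPairLt b a then b else a

-- the lexicographically least (weight, tree-node) pair connecting v to the tree nodes `vis`
def keyOpt (points : List (Int × Int)) (vis : List Int) (v : Int) : Option (Int × Int) :=
  vis.foldl (fun acc u =>
    match acc with
    | none => some (Wsym points u v, u)
    | some a => some (pminP a (Wsym points u v, u))) none

-- the (i, j) pairs (i < j) enumerated by the double loops of both programs
def pairsList (n : Int) : List (Int × Int) :=
  (PySem.List.pyRange 0 n).flatMap (fun i => (PySem.List.pyRange (i + 1) n).map (fun j => (i, j)))

-- adjacency list of u in A's complete graph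
def nbrList (points : List (Int × Int)) (n u : Int) : List (Int × Int) :=
  ((PySem.List.pyRange 0 u).map (fun i => (i, Wsym points u i))) ++
  ((PySem.List.pyRange (u + 1) n).map (fun j => (j, Wsym points u j)))

-- payload list contributed to column u by the pair ij
def colG (points : List (Int × Int)) (u : Int) (ij : Int × Int) : List (Int × Int) :=
  (if ij.1 = u then [(ij.2, Wfun points ij.1 ij.2)] else []) ++
  (if ij.2 = u then [(ij.1, Wfun points ij.1 ij.2)] else [])

-- ---------- generic small lemmas ----------

theorem nodup_pyRange (a b : Int) : (PySem.List.pyRange a b).Nodup := by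
  rw [PySem.List.pyRange_of_pos a b Int.one_pos]
  exact List.Nodup.map (fun x y hxy => by omega) List.nodup_range

theorem pairwise_lt_pyRange (a b : Int) : (PySem.List.pyRange a b).Pairwise (· < ·) := by
  rw [PySem.List.pyRange_of_pos a b Int.one_pos]
  exact List.Pairwise.map _ (fun x y hxy => by omega) List.pairwise_lt_range

theorem nodup_length_le {l1 l2 : List Int} (h : l1.Nodup) (hs : l1 ⊆ l2) :
    l1.length ≤ l2.length := by
  classical
  calc l1.length = l1.toFinset.card := (List.toFinset_card_of_nodup h).symm
  _ ≤ l2.toFinset.card := Finset.card_le_card (by intro x hx; simp only [List.mem_toFinset] at *; exact hs hx)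
  _ ≤ l2.length := l2.toFinset_card_le

theorem set_contains_iff {α : Type} [BEq α] [LawfulBEq α] (s : PySem.Set α) (x : α) :
    PySem.Set.contains s x = true ↔ x ∈ s := by
  simp [PySem.Set.contains]

theorem set_add_of_not_mem {α : Type} [BEq α] [LawfulBEq α] (s : PySem.Set α) (x : α)
    (h : x ∉ s) : PySem.Set.add s x = s ++ [x] := by
  simp [PySem.Set.add, PySem.Set.contains, h]

theorem length_pyRange (a b : Int) :
    ((PySem.List.pyRange a b).length : Int) = if a < b then b - a else 0 := by
  rw [PySem.List.pyRange_of_pos a b Int.one_pos]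
  split <;> simp <;> omega

theorem dict_contains_iff {κ ν : Type} [BEq κ] [LawfulBEq κ] (d : PySem.Dict κ ν) (k : κ) :
    d.contains k = (d.get? k).isSome := by
  simp only [PySem.Dict.contains, PySem.Dict.get?, Option.isSome_map]
  rw [Bool.eq_iff_iff]
  simp [List.any_eq_true, List.find?_isSome]

theorem popMin?_none {l : List (Int × Int × Int)} : popMin? l = none ↔ l = [] := by
  cases l with
  | nil => simp [popMin?]
  | cons x xs =>
    simp only [popMin?]
    cases popMin? xs with
    | none => simp
    | some p => cases p with | mk m rest => by_cases h : pyLexLt3 m x <;> simp [h]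

theorem popMin?_perm {l : List (Int × Int × Int)} {m : Int × Int × Int}
    {rest : List (Int × Int × Int)} (h : popMin? l = some (m, rest)) :
    l.Perm (m :: rest) := by
  induction l generalizing m rest with
  | nil => simp [popMin?] at h
  | cons x xs ih =>
    simp only [popMin?] at h
    cases hx : popMin? xs with
    | none =>
      rw [hx] at h
      simp at h
      obtain ⟨rfl, rfl⟩ := h
      have : xs = [] := popMin?_none.mp hx
      subst this; rfl
    | some p =>
      obtain ⟨m', rest'⟩ := p
      rw [hx] at h
      by_cases hcmp : pyLexLt3 m' x <;> simp [hcmp] at h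
      · obtain ⟨rfl, rfl⟩ := h
        exact List.Perm.trans ((ih hx).cons x) (List.Perm.swap _ _ _)
      · obtain ⟨rfl, rfl⟩ := h
        exact List.Perm.refl _

theorem popMin?_min {l : List (Int × Int × Int)} {m : Int × Int × Int}
    {rest : List (Int × Int × Int)} (h : popMin? l = some (m, rest)) :
    ∀ e ∈ l, pyLexLt3 e m = false := by
  induction l generalizing m rest with
  | nil => simp [popMin?] at h
  | cons x xs ih =>
    simp only [popMin?] at h
    cases hx : popMin? xs with
    | none =>
      rw [hx] at h
      simp at h
      obtain ⟨rfl, rfl⟩ := h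
      have : xs = [] := popMin?_none.mp hx
      subst this
      intro e he
      simp at he; subst he
      simp [pyLexLt3]
    | some p =>
      obtain ⟨m', rest'⟩ := p
      rw [hx] at h
      by_cases hcmp : pyLexLt3 m' x <;> simp [hcmp] at h <;> obtain ⟨rfl, rfl⟩ := h
      · intro e he
        rcases List.mem_cons.mp he with rfl | he'
        · simp [pyLexLt3] at hcmp ⊢; omega
        · exact ih hx e he'
      · intro e he
        rcases List.mem_cons.mp he with rfl | he'
        · simp [pyLexLt3]
        · have h1 := ih hx e he'
          simp [pyLexLt3] at h1 hcmp ⊢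
          omega

theorem pyRange_nil {a b : Int} (h : b ≤ a) : PySem.List.pyRange a b = [] := by
  rw [PySem.List.pyRange_of_pos a b Int.one_pos]; simp; omega

theorem flatMap_sing {α β : Type} (l : List α) (f : α → β) :
    l.flatMap (fun x => [f x]) = l.map f := by
  induction l with
  | nil => rfl
  | cons x xs ih => simp [List.flatMap_cons, ih]

theorem flatMap_congr {α β : Type} {l : List α} {f g : α → List β}
    (h : ∀ x ∈ l, f x = g x) : l.flatMap f = l.flatMap g := by
  induction l with
  | nil => rfl
  | cons x xs ih =>
    rw [List.flatMap_cons, List.flatMap_cons, h x List.mem_cons_self,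
        ih (fun y hy => h y (List.mem_cons_of_mem _ hy))]



theorem foldl_pairs {σ : Type} (n : Int) (F : σ → Int → Int → σ) (s : σ) :
    (PySem.List.pyRange 0 n).foldl (fun s i =>
      (PySem.List.pyRange (i + 1) n).foldl (fun s j => F s i j) s) s
      = (pairsList n).foldl (fun s ij => F s ij.1 ij.2) s := by
  rw [pairsList, List.foldl_flatMap]
  simp [List.foldl_map]

theorem mem_pairsList {n : Int} {ij : Int × Int} :
    ij ∈ pairsList n ↔ 0 ≤ ij.1 ∧ ij.1 < ij.2 ∧ ij.2 < n := by
  obtain ⟨i, j⟩ := ij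
  simp only [pairsList, List.mem_flatMap, List.mem_map, PySem.List.mem_pyRange_one]
  constructor
  · rintro ⟨a, ⟨ha0, han⟩, b, ⟨hb1, hb2⟩, heq⟩
    cases heq
    exact ⟨ha0, by omega, hb2⟩
  · rintro ⟨h0, hij, hn⟩
    exact ⟨i, ⟨h0, by omega⟩, ⟨j, ⟨by omega, hn⟩, rfl⟩⟩

theorem pick_one (points : List (Int × Int)) (u i : Int) :
    ∀ (k : Nat) (a b : Int), k = (b - a).toNat →
    (PySem.List.pyRange a b).flatMap (fun j => if j = u then [(i, Wfun points i j)] else [])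
      = if a ≤ u ∧ u < b then [(i, Wfun points i u)] else [] := by
  intro k
  induction k with
  | zero =>
    intro a b hk
    rw [pyRange_nil (by omega)]
    simp; omega
  | succ k ih =>
    intro a b hk
    by_cases hab : a < b
    · rw [PySem.List.pyRange_one_cons hab, List.flatMap_cons, ih (a+1) b (by omega)]
      by_cases hau : a = u
      · subst hau
        simp [hab]
      · simp only [if_neg hau, List.nil_append]
        by_cases h1 : a + 1 ≤ u ∧ u < b
        · rw [if_pos h1, if_pos (by omega)]
        · rw [if_neg h1, if_neg (by omega)]
    · rw [pyRange_nil (by omega)]; simp; omega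

theorem col_hi (points : List (Int × Int)) (n u : Int) :
    ∀ (k : Nat) (a : Int), k = (n - a).toNat → u < a →
    (PySem.List.pyRange a n).flatMap
      (fun i => (PySem.List.pyRange (i + 1) n).flatMap (fun j => colG points u (i, j))) = [] := by
  intro k
  induction k with
  | zero => intro a hk ha; rw [pyRange_nil (by omega)]; rfl
  | succ k ih =>
    intro a hk ha
    by_cases hab : a < n
    · rw [PySem.List.pyRange_one_cons hab, List.flatMap_cons, ih (a+1) (by omega) (by omega)]
      rw [List.append_nil, List.flatMap_eq_nil_iff]
      intro j hj
      rw [PySem.List.mem_pyRange_one] at hj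
      simp only [colG]
      rw [if_neg (by omega), if_neg (by omega)]
      rfl
    · rw [pyRange_nil (by omega)]; rfl

theorem col_lo (points : List (Int × Int)) (n u : Int) (hun : u < n) :
    ∀ (k : Nat) (a : Int), k = (u - a).toNat → a ≤ u →
    (PySem.List.pyRange a n).flatMap
      (fun i => (PySem.List.pyRange (i + 1) n).flatMap (fun j => colG points u (i, j)))
      = ((PySem.List.pyRange a u).map (fun i => (i, Wfun points i u))) ++
        ((PySem.List.pyRange (u + 1) n).map (fun j => (j, Wfun points u j))) := by
  intro k
  induction k with
  | zero =>
    intro a hk hau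
    have hau' : a = u := by omega
    subst hau'
    rw [PySem.List.pyRange_one_cons hun, List.flatMap_cons,
        col_hi points n a (n - (a+1)).toNat (a+1) rfl (by omega), List.append_nil,
        pyRange_nil (le_refl a)]
    have hinner : ∀ j ∈ PySem.List.pyRange (a + 1) n, colG points a (a, j) = [(j, Wfun points a j)] := by
      intro j hj
      rw [PySem.List.mem_pyRange_one] at hj
      simp [colG, show ¬ (j = a) by omega]
    rw [flatMap_congr hinner, flatMap_sing]
    rfl
  | succ k ih =>
    intro a hk hau
    by_cases hcase : a = u
    · -- same as base case (k+1 can also witness a = u when toNat = 0 is impossible here)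
      subst hcase
      rw [PySem.List.pyRange_one_cons hun, List.flatMap_cons,
          col_hi points n a (n - (a+1)).toNat (a+1) rfl (by omega), List.append_nil,
          pyRange_nil (le_refl a)]
      have hinner : ∀ j ∈ PySem.List.pyRange (a + 1) n, colG points a (a, j) = [(j, Wfun points a j)] := by
        intro j hj
        rw [PySem.List.mem_pyRange_one] at hj
        simp [colG, show ¬ (j = a) by omega]
      rw [flatMap_congr hinner, flatMap_sing]
      rfl
    · have haun : a < u := by omega
      have han : a < n := by omega
      rw [PySem.List.pyRange_one_cons han, List.flatMap_cons, ih (a+1) (by omega) (by omega),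
          PySem.List.pyRange_one_cons haun, List.map_cons]
      have hinner : ∀ j ∈ PySem.List.pyRange (a + 1) n,
          colG points u (a, j) = (if j = u then [(a, Wfun points a j)] else []) := by
        intro j hj
        simp only [colG]
        rw [if_neg (by omega)]
        by_cases hju : j = u <;> simp [hju]
      rw [flatMap_congr hinner, pick_one points u a (n - (a+1)).toNat (a+1) n rfl,
          if_pos (by omega)]
      rfl

theorem buildGraph_getD (points : List (Int × Int)) (u : Int)
    (h0 : 0 ≤ u) (hn : u < (points.length : Int)) :
    (buildGraph points).getD u [] = nbrList points (points.length : Int) u := by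
  have key : buildGraph points
      = (pairsList (points.length : Int)).foldl
          (fun g ij => (g.modify ij.1 [] (· ++ [(ij.2, Wfun points ij.1 ij.2)])).modify ij.2 []
            (· ++ [(ij.1, Wfun points ij.1 ij.2)])) PySem.Dict.empty := by
    exact foldl_pairs _ _ _
  rw [key]
  have hsplit : (pairsList (points.length : Int)).foldl
      (fun g ij => (g.modify ij.1 [] (· ++ [(ij.2, Wfun points ij.1 ij.2)])).modify ij.2 []
        (· ++ [(ij.1, Wfun points ij.1 ij.2)])) PySem.Dict.empty
      = ((pairsList (points.length : Int)).flatMap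
          (fun ij => [(ij.1, (ij.2, Wfun points ij.1 ij.2)), (ij.2, (ij.1, Wfun points ij.1 ij.2))])).foldl
          (fun d p => d.modify p.1 [] (· ++ [p.2])) PySem.Dict.empty := by
    rw [List.foldl_flatMap]
    rfl
  rw [hsplit, PySem.Dict.getD_foldl_modify_append]
  have hempty : (PySem.Dict.empty : PySem.Dict Int (List (Int × Int))).getD u [] = [] := by
    simp [PySem.Dict.getD, PySem.Dict.get?_empty]
  rw [hempty, List.nil_append]
  rw [List.filter_flatMap, List.map_flatMap]
  have hcol : ∀ ij ∈ pairsList (points.length : Int),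
      (List.map (fun x => x.2) (List.filter (fun p => p.1 == u)
        [(ij.1, (ij.2, Wfun points ij.1 ij.2)), (ij.2, (ij.1, Wfun points ij.1 ij.2))]))
      = colG points u ij := by
    intro ij _
    by_cases h1 : ij.1 = u <;> by_cases h2 : ij.2 = u <;>
      simp [colG, beq_iff_eq, h1, h2]
  rw [flatMap_congr hcol]
  rw [pairsList, List.flatMap_assoc]
  have hmapped : ∀ i ∈ PySem.List.pyRange 0 (points.length : Int),
      (List.flatMap (colG points u) ((PySem.List.pyRange (i + 1) (points.length : Int)).map (fun j => (i, j))))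
      = (PySem.List.pyRange (i + 1) (points.length : Int)).flatMap (fun j => colG points u (i, j)) := by
    intro i _
    rw [List.flatMap_map]
  rw [flatMap_congr hmapped]
  rw [col_lo points (points.length : Int) u hn u.toNat 0 (by omega) h0]
  unfold nbrList
  congr 1
  · apply List.map_congr_left
    intro i hi
    rw [PySem.List.mem_pyRange_one] at hi
    rw [Wsym, if_neg (by omega)]
  · apply List.map_congr_left
    intro j hj
    rw [PySem.List.mem_pyRange_one] at hj
    rw [Wsym, if_pos (by omega)]

theorem keyOpt_append (points : List (Int × Int)) (l : List Int) (u v : Int) :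
    keyOpt points (l ++ [u]) v
      = some (match keyOpt points l v with
              | none => (Wsym points u v, u)
              | some a => pminP a (Wsym points u v, u)) := by
  unfold keyOpt
  rw [List.foldl_append]
  cases (l.foldl (fun acc u =>
    match acc with
    | none => some (Wsym points u v, u)
    | some a => some (pminP a (Wsym points u v, u))) none) <;> simp

theorem keyOpt_isSome (points : List (Int × Int)) (vis : List Int) (v : Int) (h : vis ≠ []) :
    (keyOpt points vis v).isSome := by
  induction vis using List.reverseRecOn with
  | nil => simp at h
  | append_singleton l u ih => rw [keyOpt_append]; simp

theorem keyOpt_spec (points : List (Int × Int)) (vis : List Int) (v : Int) {K : Int × Int}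
    (h : keyOpt points vis v = some K) :
    K ∈ vis.map (fun u => (Wsym points u v, u)) ∧
      ∀ u ∈ vis, pyPairLt (Wsym points u v, u) K = false := by
  induction vis using List.reverseRecOn generalizing K with
  | nil => simp [keyOpt] at h
  | append_singleton l u ih =>
    rw [keyOpt_append] at h
    cases hl : keyOpt points l v with
    | none =>
      rw [hl] at h
      have hlnil : l = [] := by
        by_contra hne
        have := keyOpt_isSome points l v hne
        rw [hl] at this; simp at this
      subst hlnil
      simp at h
      subst h
      constructor
      · simp
      · intro u' hu'; simp at hu'; subst hu'; simp [pyPairLt]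
    | some a =>
      rw [hl] at h
      simp at h
      obtain ⟨ha, hmin⟩ := ih hl
      subst h
      unfold pminP
      by_cases hc : pyPairLt (Wsym points u v, u) a
      · rw [if_pos hc]
        refine ⟨by simp, ?_⟩
        intro u' hu'
        rcases List.mem_append.mp hu' with h1 | h1
        · have := hmin u' h1
          simp [pyPairLt] at this hc ⊢
          omega
        · simp at h1; subst h1; simp [pyPairLt]
      · rw [if_neg hc]
        refine ⟨?_, ?_⟩
        · rcases List.mem_map.mp ha with ⟨x, hx, hxe⟩
          exact List.mem_map.mpr ⟨x, List.mem_append_left _ hx, hxe⟩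
        · intro u' hu'
          rcases List.mem_append.mp hu' with h1 | h1
          · exact hmin u' h1
          · simp at h1; subst h1
            simp [pyPairLt] at hc ⊢
            omega

theorem insert_fold_get? (points : List (Int × Int)) :
    ∀ (l : List (Int × Int)) (d : PySem.Dict (Int × Int) Int) (k : Int × Int),
    ((l.foldl (fun d ij => d.insert ij (Wfun points ij.1 ij.2)) d).get? k)
      = if k ∈ l then some (Wfun points k.1 k.2) else d.get? k := by
  intro l
  induction l with
  | nil => simp
  | cons ij rest ih =>
    intro d k
    simp only [List.foldl_cons]
    rw [ih]
    by_cases hm : k ∈ rest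
    · simp [hm]
    · by_cases he : k = ij
      · subst he
        simp [hm, PySem.Dict.get?_insert_self]
      · simp [hm, he, PySem.Dict.get?_insert_of_ne _ _ he]


theorem distTable_get? (points : List (Int × Int)) (u v : Int) :
    (distTable points).get? (u, v)
      = if 0 ≤ u ∧ u < v ∧ v < (points.length : Int) then some (Wfun points u v) else none := by
  have key : distTable points
      = (pairsList (points.length : Int)).foldl
          (fun d ij => d.insert ij (Wfun points ij.1 ij.2)) PySem.Dict.empty := by
    exact foldl_pairs _ _ _
  rw [key, insert_fold_get? points]
  by_cases h : ((u, v) : Int × Int) ∈ pairsList (points.length : Int)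
  · rw [if_pos h]
    rw [mem_pairsList] at h
    rw [if_pos h]
  · rw [if_neg h, PySem.Dict.get?_empty, if_neg (by rw [mem_pairsList] at h; exact h)]

theorem wOf_eq (points : List (Int × Int)) (u v : Int) (h0u : 0 ≤ u) (h0v : 0 ≤ v)
    (hu : u < (points.length : Int)) (hv : v < (points.length : Int)) (hne : u ≠ v) :
    wOf (distTable points) u v = Wsym points u v := by
  unfold wOf Wsym
  by_cases h : u < v
  · rw [if_pos h, if_pos h, PySem.Dict.getD, distTable_get?, if_pos ⟨h0u, h, hv⟩]
    rfl
  · rw [if_neg h, if_neg h, PySem.Dict.getD, distTable_get?, if_pos ⟨h0v, by omega, hu⟩]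
    rfl

theorem foldl_const {α σ : Type} (f : σ → σ) :
    ∀ (l : List α) (s : σ), l.foldl (fun s _ => f s) s = f^[l.length] s := by
  intro l
  induction l with
  | nil => intro s; rfl
  | cons x xs ih =>
    intro s
    rw [List.foldl_cons, ih, List.length_cons, Function.iterate_succ_apply]

-- one relax step only changes the key it processes
theorem relax_step_other (dist : PySem.Dict (Int × Int) Int) (intree : PySem.Set Int) (last : Int)
    (b : PySem.Dict Int (Int × Int)) (v w : Int) (hne : v ≠ w) :
    ((fun b v =>
      if PySem.Set.contains intree v then b
      else
        if !b.contains v || pyPairLt (wOf dist last v, last) (b.getD v (0, 0)) then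
          b.insert v (wOf dist last v, last)
        else b) b w).get? v = b.get? v := by
  simp only []
  split
  · rfl
  · split
    · exact PySem.Dict.get?_insert_of_ne _ _ hne
    · rfl

theorem relax_fold_not_mem (dist : PySem.Dict (Int × Int) Int) (intree : PySem.Set Int) (last : Int) :
    ∀ (l : List Int) (b : PySem.Dict Int (Int × Int)) (v : Int), v ∉ l →
    (l.foldl (fun b v =>
      if PySem.Set.contains intree v then b
      else
        if !b.contains v || pyPairLt (wOf dist last v, last) (b.getD v (0, 0)) then
          b.insert v (wOf dist last v, last)
        else b) b).get? v = b.get? v := by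
  intro l
  induction l with
  | nil => intro b v _; rfl
  | cons x xs ih =>
    intro b v hv
    rw [List.foldl_cons, ih _ _ (fun h => hv (List.mem_cons_of_mem _ h)),
        relax_step_other dist intree last b v x (fun h => hv (h ▸ List.mem_cons_self))]

theorem relax_fold_get? (dist : PySem.Dict (Int × Int) Int) (intree : PySem.Set Int) (last : Int) :
    ∀ (l : List Int) (b : PySem.Dict Int (Int × Int)) (v : Int), l.Nodup → v ∈ l →
    v ∉ intree →
    (l.foldl (fun b v =>
      if PySem.Set.contains intree v then b
      else
        if !b.contains v || pyPairLt (wOf dist last v, last) (b.getD v (0, 0)) then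
          b.insert v (wOf dist last v, last)
        else b) b).get? v
      = some (match b.get? v with
              | none => (wOf dist last v, last)
              | some a => pminP a (wOf dist last v, last)) := by
  intro l
  induction l with
  | nil => intro b v _ hv; simp at hv
  | cons x xs ih =>
    intro b v hnd hv hvi
    rcases List.mem_cons.mp hv with rfl | hv'
    · rw [List.foldl_cons, relax_fold_not_mem dist intree last xs _ v (List.nodup_cons.mp hnd).1]
      have hc : PySem.Set.contains intree v = false := by
        rw [← Bool.not_eq_true]; intro h; exact hvi ((set_contains_iff _ _).mp h)
      simp only [hc, Bool.false_eq_true, if_false]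
      cases hbv : b.get? v with
      | none =>
        have hcont : b.contains v = false := by rw [dict_contains_iff, hbv]; rfl
        simp only [hcont, Bool.not_false, Bool.true_or, if_true]
        rw [PySem.Dict.get?_insert_self]
      | some a =>
        have hcont : b.contains v = true := by rw [dict_contains_iff, hbv]; rfl
        have hgd : b.getD v (0, 0) = a := by rw [PySem.Dict.getD, hbv]; rfl
        simp only [hcont, Bool.not_true, Bool.false_or, hgd, pminP]
        by_cases hlt : pyPairLt (wOf dist last v, last) a
        · simp only [hlt, if_true, PySem.Dict.get?_insert_self]
        · simp only [hlt, Bool.false_eq_true, if_false, hbv]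
    · rw [List.foldl_cons, ih _ v (List.nodup_cons.mp hnd).2 hv' hvi,
        relax_step_other dist intree last b v x (fun h => (List.nodup_cons.mp hnd).1 (h ▸ hv'))]

-- relaxB: на unvisited keys the new best is keyOpt over the whole visit list
theorem relaxB_char (points : List (Int × Int)) (vis : List Int) (best : PySem.Dict Int (Int × Int))
    (hne : vis ≠ [])
    (hvis : ∀ x ∈ vis, 0 ≤ x ∧ x < (points.length : Int))
    (hbest : ∀ v : Int, 0 ≤ v → v < (points.length : Int) → v ∉ vis →
      best.get? v = keyOpt points vis.dropLast v) :
    ∀ v : Int, 0 ≤ v → v < (points.length : Int) → v ∉ vis →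
      (relaxB (distTable points) (points.length : Int) vis (vis.getLast hne) best).get? v
        = keyOpt points vis v := by
  intro v h0 hn hv
  unfold relaxB
  rw [relax_fold_get? (distTable points) vis (vis.getLast hne) (PySem.List.pyRange 0 _) best v
      (nodup_pyRange _ _) (PySem.List.mem_pyRange_one.mpr ⟨h0, hn⟩) hv]
  have hlast := List.getLast_mem hne
  have hl0 := (hvis _ hlast).1
  have hln := (hvis _ hlast).2
  have hw : wOf (distTable points) (vis.getLast hne) v = Wsym points (vis.getLast hne) v :=
    wOf_eq points _ v hl0 h0 hln hn (fun h => hv (h ▸ hlast))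
  rw [hbest v h0 hn hv, hw]
  conv_rhs => rw [← List.dropLast_append_getLast hne]
  rw [keyOpt_append]

-- once the accumulator is u*, it never changes if no candidate beats it strictly
theorem select_stay (intree : PySem.Set Int) (best : PySem.Dict Int (Int × Int)) (ustar : Int)
    (h0 : 0 ≤ ustar) :
    ∀ (l : List Int),
    (∀ v ∈ l, PySem.Set.contains intree v = false →
      ¬((best.getD v (0, 0)).1 < (best.getD ustar (0, 0)).1)) →
    (l.foldl (fun u v =>
      if !PySem.Set.contains intree v && (u == -1 || (best.getD v (0, 0)).1 < (best.getD u (0, 0)).1)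
      then v else u) ustar) = ustar := by
  intro l
  induction l with
  | nil => intro _; rfl
  | cons x xs ih =>
    intro h
    rw [List.foldl_cons]
    have hne : (ustar == -1) = false := by simp; omega
    by_cases hc : PySem.Set.contains intree x
    · simp only [hc, Bool.not_true, Bool.false_and, Bool.false_eq_true, if_false]
      exact ih (fun v hv => h v (List.mem_cons_of_mem _ hv))
    · have hc' : PySem.Set.contains intree x = false := by
        rw [← Bool.not_eq_true]; exact hc
      have hnlt : ((best.getD x (0, 0)).1 < (best.getD ustar (0, 0)).1 : Bool) = false := by
        simp
        have := h x List.mem_cons_self hc'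
        omega
      simp only [hc', Bool.not_false, Bool.true_and, hne, hnlt, Bool.false_or,
        Bool.false_eq_true, if_false]
      exact ih (fun v hv => h v (List.mem_cons_of_mem _ hv))

theorem select_search (intree : PySem.Set Int) (best : PySem.Dict Int (Int × Int)) (ustar : Int)
    (h0 : 0 ≤ ustar) (hu : ustar ∉ intree) :
    ∀ (l : List Int) (acc : Int),
    l.Pairwise (· < ·) → ustar ∈ l →
    (∀ v ∈ l, 0 ≤ v) →
    (∀ v ∈ l, v ∉ intree → v ≠ ustar →
      ((best.getD ustar (0, 0)).1 < (best.getD v (0, 0)).1 ∨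
       ((best.getD ustar (0, 0)).1 = (best.getD v (0, 0)).1 ∧ ustar < v))) →
    (acc = -1 ∨ (0 ≤ acc ∧ (best.getD ustar (0, 0)).1 < (best.getD acc (0, 0)).1)) →
    (l.foldl (fun u v =>
      if !PySem.Set.contains intree v && (u == -1 || (best.getD v (0, 0)).1 < (best.getD u (0, 0)).1)
      then v else u) acc) = ustar := by
  intro l
  induction l with
  | nil => intro acc _ hm; simp at hm
  | cons x xs ih =>
    intro acc hpw hm hpos hmin hacc
    rw [List.foldl_cons]
    rcases List.mem_cons.mp hm with rfl | hm'
    · -- the head is ustar: the accumulator becomes ustar, then stays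
      have hcu : PySem.Set.contains intree ustar = false := by
        rw [← Bool.not_eq_true]; intro h; exact hu ((set_contains_iff _ _).mp h)
      have hcond : (acc == -1 || decide ((best.getD ustar (0, 0)).1 < (best.getD acc (0, 0)).1)) = true := by
        rcases hacc with rfl | ⟨_, hlt⟩
        · simp
        · simp [hlt]
      simp only [hcu, Bool.not_false, Bool.true_and, hcond, if_true]
      apply select_stay intree best ustar h0 xs
      intro v hv hvc
      have hvlt : ustar < v := (List.pairwise_cons.mp hpw).1 v hv
      have hvi : v ∉ intree := by
        intro h
        rw [(set_contains_iff _ _).mpr h] at hvc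
        simp at hvc
      have := hmin v (List.mem_cons_of_mem _ hv) hvi (by omega)
      omega
    · -- ustar is further on
      have hxlt : x < ustar := (List.pairwise_cons.mp hpw).1 ustar hm'
      have hrest := (List.pairwise_cons.mp hpw).2
      have hposr : ∀ v ∈ xs, 0 ≤ v := fun v hv => hpos v (List.mem_cons_of_mem _ hv)
      have hminr : ∀ v ∈ xs, v ∉ intree → v ≠ ustar →
          ((best.getD ustar (0, 0)).1 < (best.getD v (0, 0)).1 ∨
           ((best.getD ustar (0, 0)).1 = (best.getD v (0, 0)).1 ∧ ustar < v)) :=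
        fun v hv h1 h2 => hmin v (List.mem_cons_of_mem _ hv) h1 h2
      by_cases hc : PySem.Set.contains intree x
      · simp only [hc, Bool.not_true, Bool.false_and, Bool.false_eq_true, if_false]
        exact ih acc hrest hm' hposr hminr hacc
      · have hc' : PySem.Set.contains intree x = false := by rw [← Bool.not_eq_true]; exact hc
        have hxi : x ∉ intree := fun h => (hc ((set_contains_iff _ _).mpr h)).elim
        have hxrel : (best.getD ustar (0, 0)).1 < (best.getD x (0, 0)).1 := by
          rcases hmin x List.mem_cons_self hxi (by omega) with h | ⟨_, h⟩
          · exact h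
          · omega
        split
        · exact ih x hrest hm' hposr hminr (Or.inr ⟨hpos x List.mem_cons_self, hxrel⟩)
        · exact ih acc hrest hm' hposr hminr hacc

theorem push_fold (vis' : PySem.Set Int) (u : Int) (l : List (Int × Int)) (acc : List (Int × Int × Int)) :
    l.foldl (fun p vw => if PySem.Set.contains vis' vw.1 then p else p ++ [(vw.2, vw.1, u)]) acc
      = acc ++ (l.filter (fun vw => !PySem.Set.contains vis' vw.1)).map (fun vw => (vw.2, vw.1, u)) := by
  have hf : (fun (p : List (Int × Int × Int)) (vw : Int × Int) =>
        if PySem.Set.contains vis' vw.1 then p else p ++ [(vw.2, vw.1, u)])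
      = (fun p vw => if (!PySem.Set.contains vis' vw.1) = true then p ++ [(vw.2, vw.1, u)] else p) := by
    funext p vw
    by_cases h : PySem.Set.contains vis' vw.1 <;> simp [h]
  rw [hf, PySem.List.foldl_append_if]

theorem range_pick_filter (v : Int) (r : Int → Bool) (hr : r v = true) :
    ∀ (k : Nat) (a b : Int), k = (b - a).toNat →
    (PySem.List.pyRange a b).filter (fun x => (x == v) && r x)
      = if a ≤ v ∧ v < b then [v] else [] := by
  intro k
  induction k with
  | zero =>
    intro a b hk
    rw [pyRange_nil (by omega)]
    simp; omega
  | succ k ih =>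
    intro a b hk
    by_cases hab : a < b
    · rw [PySem.List.pyRange_one_cons hab, List.filter_cons, ih (a + 1) b (by omega)]
      by_cases hav : a = v
      · subst hav
        simp [hr]
        omega
      · have : ((a == v) && r a) = false := by simp [hav]
        rw [this]
        simp only [Bool.false_eq_true, if_false]
        by_cases h1 : a + 1 ≤ v ∧ v < b
        · rw [if_pos h1, if_pos (by omega)]
        · rw [if_neg h1, if_neg (by omega)]
    · rw [pyRange_nil (by omega)]; simp; omega

theorem push_col (points : List (Int × Int)) (u v : Int) (vis' : PySem.Set Int)
    (h0u : 0 ≤ u) (hun : u < (points.length : Int)) (h0v : 0 ≤ v) (hvn : v < (points.length : Int))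
    (hne : v ≠ u) (hv : v ∉ vis') :
    (((nbrList points (points.length : Int) u).filter
        (fun vw => !PySem.Set.contains vis' vw.1)).map
        (fun vw => ((vw.2, vw.1, u) : Int × Int × Int))).filter (fun e => e.2.1 == v)
      = [(Wsym points u v, v, u)] := by
  have hrv : (!PySem.Set.contains vis' v) = true := by
    simp only [Bool.not_eq_true']
    rw [← Bool.not_eq_true]
    intro h
    exact hv ((set_contains_iff _ _).mp h)
  unfold nbrList
  simp only [List.filter_append, List.filter_map, List.filter_filter, Function.comp, List.map_append]
  rw [range_pick_filter v (fun x => !PySem.Set.contains vis' x) hrv (u - 0).toNat 0 u (by omega),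
      range_pick_filter v (fun x => !PySem.Set.contains vis' x) hrv
        ((points.length : Int) - (u + 1)).toNat (u + 1) (points.length : Int) (by omega)]
  by_cases hcase : v < u
  · rw [if_pos ⟨h0v, hcase⟩, if_neg (by omega)]
    simp only [List.map_cons, List.map_nil, List.append_nil]
  · rw [if_neg (by omega), if_pos ⟨by omega, hvn⟩]
    simp only [List.map_cons, List.map_nil, List.nil_append]

theorem primLoop_stop (graph : PySem.Dict Int (List (Int × Int))) (n : Int) (fuel : Nat)
    (pool : List (Int × Int × Int)) (vis : PySem.Set Int) (mst : PySem.Dict Int (List Int))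
    (h : ¬ (PySem.Set.len vis < n)) :
    primLoop graph n (fuel + 1) pool vis mst = mst := by
  unfold primLoop
  rw [if_neg h]

theorem primLoop_skip (graph : PySem.Dict Int (List (Int × Int))) (n : Int) (fuel : Nat)
    (pool pool' : List (Int × Int × Int)) (m : Int × Int × Int) (vis : PySem.Set Int)
    (mst : PySem.Dict Int (List Int))
    (hg : PySem.Set.len vis < n) (hpop : popMin? pool = some (m, pool'))
    (hs : PySem.Set.contains vis m.2.1 = true) :
    primLoop graph n (fuel + 1) pool vis mst = primLoop graph n fuel pool' vis mst := by
  conv_lhs => unfold primLoop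
  rw [if_pos hg, hpop]
  simp only [hs, if_true]

theorem primLoop_visit (graph : PySem.Dict Int (List (Int × Int))) (n : Int) (fuel : Nat)
    (pool pool' : List (Int × Int × Int)) (m : Int × Int × Int) (vis : PySem.Set Int)
    (mst : PySem.Dict Int (List Int))
    (hg : PySem.Set.len vis < n) (hpop : popMin? pool = some (m, pool'))
    (hs : PySem.Set.contains vis m.2.1 = false) :
    primLoop graph n (fuel + 1) pool vis mst
      = primLoop graph n fuel
          ((graph.getD m.2.1 []).foldl
            (fun p vw => if PySem.Set.contains (PySem.Set.add vis m.2.1) vw.1 then p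
              else p ++ [(vw.2, vw.1, m.2.1)]) pool')
          (PySem.Set.add vis m.2.1)
          (if m.2.2 != -1 then (mst.modify m.2.2 [] (· ++ [m.2.1])).modify m.2.1 [] (· ++ [m.2.2]) else mst) := by
  conv_lhs => unfold primLoop
  rw [if_pos hg, hpop]
  simp only [hs, Bool.false_eq_true, if_false]

theorem exists_unvisited (n : Int) (vis : List Int) (hnd : vis.Nodup)
    (hb : ∀ x ∈ vis, 0 ≤ x ∧ x < n) (hlt : (vis.length : Int) < n) :
    ∃ v : Int, 0 ≤ v ∧ v < n ∧ v ∉ vis := by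
  by_contra h
  push_neg at h
  have hsub : PySem.List.pyRange 0 n ⊆ vis := by
    intro x hx
    rw [PySem.List.mem_pyRange_one] at hx
    exact h x hx.1 hx.2
  have := nodup_length_le (nodup_pyRange 0 n) hsub
  have hlen := length_pyRange 0 n
  have h0n : 0 < n := by omega
  rw [if_pos (by omega)] at hlen
  omega

theorem mem_nbrList (points : List (Int × Int)) (u : Int) (h0u : 0 ≤ u) (hu : u < (points.length : Int)) {vw : Int × Int}
    (h : vw ∈ nbrList points (points.length : Int) u) :
    0 ≤ vw.1 ∧ vw.1 < (points.length : Int) ∧ (0 ≤ u → vw.1 ≠ u) := by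
  unfold nbrList at h
  rcases List.mem_append.mp h with h1 | h1 <;>
    obtain ⟨x, hx, rfl⟩ := List.mem_map.mp h1 <;>
    rw [PySem.List.mem_pyRange_one] at hx <;>
    exact ⟨by omega, by omega, fun _ => by omega⟩

theorem nbrList_len (points : List (Int × Int)) (u : Int) (h0 : 0 ≤ u) (hu : u < (points.length : Int)) :
    ((nbrList points (points.length : Int) u).length : Int) ≤ (points.length : Int) := by
  unfold nbrList
  rw [List.length_append, List.length_map, List.length_map]
  have h1 := length_pyRange 0 u
  have h2 := length_pyRange (u + 1) (points.length : Int)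
  push_cast
  omega

theorem main_sim (points : List (Int × Int)) :
    ∀ (fuel k : Nat) (vis : List Int) (pool : List (Int × Int × Int))
      (mst : PySem.Dict Int (List Int)) (best : PySem.Dict Int (Int × Int)) (hne : vis ≠ [])
      (_ : vis.Nodup)
      (_ : ∀ x ∈ vis, 0 ≤ x ∧ x < (points.length : Int))
      (_ : vis.length + k = points.length)
      (_ : ∀ v : Int, 0 ≤ v → v < (points.length : Int) → v ∉ vis →
        (pool.filter (fun e => e.2.1 == v)).Perm (vis.map (fun u => (Wsym points u v, v, u))))
      (_ : ∀ e ∈ pool, 0 ≤ e.2.1 ∧ e.2.1 < (points.length : Int))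
      (_ : ∀ v : Int, 0 ≤ v → v < (points.length : Int) → v ∉ vis →
        best.get? v = keyOpt points vis.dropLast v)
      (_ : (pool.length : Int) + (k : Int) * (points.length : Int) + 1 ≤ (fuel : Int)),
      primLoop (buildGraph points) (points.length : Int) fuel pool vis mst
        = ((fun st => primStepB (distTable points) (points.length : Int) st)^[k]
            (vis, best, mst, vis.getLast hne)).2.2.1 := by
  intro fuel
  induction fuel with
  | zero =>
    intro k vis pool mst best hne hnd hbound hlen hcols hnodes hbest hfuel
    exfalso
    have hmn : (0 : Int) ≤ (k : Int) * (points.length : Int) :=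
      mul_nonneg (by positivity) (by positivity)
    omega
  | succ fuel ih =>
    intro k vis pool mst best hne hnd hbound hlen hcols hnodes hbest hfuel
    by_cases hk : k = 0
    · subst hk
      rw [primLoop_stop _ _ _ _ _ _ (by show ¬ ((vis.length : Int) < _); omega)]
      rfl
    · have hk1 : 1 ≤ k := Nat.one_le_iff_ne_zero.mpr hk
      have hg : PySem.Set.len vis < (points.length : Int) := by
        show (vis.length : Int) < _; omega
      -- some vertex is missing, hence the pool is nonempty
      obtain ⟨v0, hv00, hv0n, hv0m⟩ := exists_unvisited (points.length : Int) vis hnd hbound (by omega)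
      have hpoolne : pool ≠ [] := by
        intro hnil
        have hp := hcols v0 hv00 hv0n hv0m
        rw [hnil] at hp
        have h2 : vis.map (fun u => (Wsym points u v0, v0, u)) = [] := by
          simpa using hp.symm
        exact hne (List.map_eq_nil_iff.mp h2)
      obtain ⟨mp, hpop⟩ : ∃ mp, popMin? pool = some mp := by
        cases hp : popMin? pool with
        | none => exact absurd (popMin?_none.mp hp) hpoolne
        | some mp => exact ⟨mp, rfl⟩
      obtain ⟨m, pool'⟩ := mp
      have hperm := popMin?_perm hpop
      have hmin := popMin?_min hpop
      have hlenp : pool.length = pool'.length + 1 := by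
        have := hperm.length_eq; simpa using this
      by_cases hskip : PySem.Set.contains vis m.2.1
      · -- stale entry: its node is already in the tree, A pops and discards it
        rw [primLoop_skip _ _ _ _ _ _ _ _ hg hpop hskip]
        apply ih k vis pool' mst best hne hnd hbound hlen ?_ ?_ hbest ?_
        · intro v h0 hn hv
          have hmv : (m.2.1 == v) = false := by
            have : m.2.1 ∈ vis := (set_contains_iff _ _).mp hskip
            simp only [beq_eq_false_iff_ne]
            intro h; exact hv (h ▸ this)
          have h1 : (pool.filter (fun e => e.2.1 == v)).Perm (pool'.filter (fun e => e.2.1 == v)) := by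
            have := hperm.filter (fun e => e.2.1 == v)
            rw [List.filter_cons, hmv] at this
            simpa using this
          exact h1.symm.trans (hcols v h0 hn hv)
        · intro e he
          exact hnodes e (hperm.mem_iff.mpr (List.mem_cons_of_mem _ he))
        · omega
      · -- fresh minimum: both sides add the same node with the same parent
        have hskip' : PySem.Set.contains vis m.2.1 = false := by
          rw [← Bool.not_eq_true]; exact hskip
        have hvm : m.2.1 ∉ vis := fun h => hskip ((set_contains_iff _ _).mpr h)
        have hmpool : m ∈ pool := hperm.mem_iff.mpr List.mem_cons_self
        have hvr := hnodes m hmpool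
        -- the popped triple comes from column m.2.1
        have hmcol : m ∈ vis.map (fun u => (Wsym points u m.2.1, m.2.1, u)) := by
          have h1 : m ∈ pool.filter (fun e => e.2.1 == m.2.1) :=
            List.mem_filter.mpr ⟨hmpool, by simp⟩
          exact (hcols m.2.1 hvr.1 hvr.2 hvm).mem_iff.mp h1
        obtain ⟨p, hpvis, hmeq⟩ := List.mem_map.mp hmcol
        have hp0 : 0 ≤ p := (hbound p hpvis).1
        have hpn : p < (points.length : Int) := (hbound p hpvis).2
        -- B's relax step
        have hbest' := relaxB_char points vis best hne hbound hbest
        -- every tree vertex q contributes its triple to the column of any unvisited v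
        have htriple : ∀ (v q : Int), 0 ≤ v → v < (points.length : Int) → v ∉ vis → q ∈ vis →
            ((Wsym points q v, v, q) : Int × Int × Int) ∈ pool := by
          intro v q h0 hn hv hq
          have h1 : ((Wsym points q v, v, q) : Int × Int × Int)
              ∈ vis.map (fun u => (Wsym points u v, v, u)) := List.mem_map.mpr ⟨q, hq, rfl⟩
          exact (List.mem_filter.mp ((hcols v h0 hn hv).symm.mem_iff.mp h1)).1
        -- the key of the popped column equals the popped (cost, parent)
        have hK : keyOpt points vis m.2.1 = some (m.1, m.2.2) := by
          obtain ⟨K, hKeq⟩ := Option.isSome_iff_exists.mp (keyOpt_isSome points vis m.2.1 hne)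
          obtain ⟨hKmem, hKmin⟩ := keyOpt_spec points vis m.2.1 hKeq
          obtain ⟨q, hqvis, hqeq⟩ := List.mem_map.mp hKmem
          have h1 := hmin _ (htriple m.2.1 q hvr.1 hvr.2 hvm hqvis)
          have h2 := hKmin p hpvis
          rw [hKeq]
          have hm1 : m.1 = Wsym points p m.2.1 := by rw [← hmeq]
          have hm22 : m.2.2 = p := by rw [← hmeq]
          rw [← hqeq] at h2 ⊢
          simp only [pyLexLt3, pyPairLt, hm1, hm22, Bool.or_eq_false_iff, Bool.and_eq_false_iff,
            beq_eq_false_iff_ne, decide_eq_false_iff_not, beq_iff_eq, not_lt] at h1 h2 ⊢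
          have : Wsym points q m.2.1 = Wsym points p m.2.1 ∧ q = p := by omega
          rw [this.1, this.2]
        -- abbreviations for B's step
        have hm22 : m.2.2 = p := by rw [← hmeq]
        have hm1 : m.1 = Wsym points p m.2.1 := by rw [← hmeq]
        have hgdK : (relaxB (distTable points) (points.length : Int) vis (vis.getLast hne) best).getD m.2.1 (0, 0)
            = (m.1, m.2.2) := by
          rw [PySem.Dict.getD, hbest' m.2.1 hvr.1 hvr.2 hvm, hK]
          rfl
        -- B selects exactly the popped node
        have hsel : selectB (points.length : Int) vis
            (relaxB (distTable points) (points.length : Int) vis (vis.getLast hne) best) = m.2.1 := by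
          apply select_search vis _ m.2.1 hvr.1 hvm _ (-1) (pairwise_lt_pyRange _ _)
            (PySem.List.mem_pyRange_one.mpr ⟨hvr.1, hvr.2⟩)
            (fun v hv => (PySem.List.mem_pyRange_one.mp hv).1) ?_ (Or.inl rfl)
          intro v hv hvvis hvne
          rw [PySem.List.mem_pyRange_one] at hv
          obtain ⟨Kv, hKveq⟩ := Option.isSome_iff_exists.mp (keyOpt_isSome points vis v hne)
          have hgdv : (relaxB (distTable points) (points.length : Int) vis (vis.getLast hne) best).getD v (0, 0)
              = Kv := by
            rw [PySem.Dict.getD, hbest' v hv.1 hv.2 hvvis, hKveq]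
            rfl
          obtain ⟨hKvmem, _⟩ := keyOpt_spec points vis v hKveq
          obtain ⟨qv, hqvvis, hqveq⟩ := List.mem_map.mp hKvmem
          have htr := hmin _ (htriple v qv hv.1 hv.2 hvvis hqvvis)
          rw [hgdK, hgdv, ← hqveq]
          simp only [pyLexLt3, Bool.or_eq_false_iff, Bool.and_eq_false_iff,
            beq_eq_false_iff_ne, decide_eq_false_iff_not, not_lt, hm1] at htr ⊢
          omega
        -- unfold one visit step of A
        rw [primLoop_visit _ _ _ _ _ _ _ _ hg hpop hskip',
            buildGraph_getD points m.2.1 hvr.1 hvr.2, push_fold]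
        have hadd : PySem.Set.add vis m.2.1 = vis ++ [m.2.1] := set_add_of_not_mem vis m.2.1 hvm
        obtain ⟨k', rfl⟩ : ∃ k', k = k' + 1 := ⟨k - 1, by omega⟩
        -- one step of B
        rw [Function.iterate_succ_apply]
        have hne2 : vis ++ [m.2.1] ≠ [] := by simp
        have hbne : (m.2.2 != -1) = true := by
          rw [hm22]; simp only [bne_iff_ne, ne_eq]; omega
        have hstep : primStepB (distTable points) (points.length : Int)
              (vis, best, mst, vis.getLast hne)
            = (vis ++ [m.2.1],
               relaxB (distTable points) (points.length : Int) vis (vis.getLast hne) best,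
               ((mst.modify m.2.2 [] (· ++ [m.2.1])).modify m.2.1 [] (· ++ [m.2.2])),
               m.2.1) := by
          unfold primStepB
          simp only [hsel, hgdK, hadd, PySem.Dict.modify, hm22]
        rw [hstep, if_pos hbne]
        have hlast2 : (vis ++ [m.2.1]).getLast hne2 = m.2.1 := List.getLast_concat
        rw [show (vis ++ [m.2.1],
               relaxB (distTable points) (points.length : Int) vis (vis.getLast hne) best,
               ((mst.modify m.2.2 [] (· ++ [m.2.1])).modify m.2.1 [] (· ++ [m.2.2])),
               m.2.1)
            = (vis ++ [m.2.1],
               relaxB (distTable points) (points.length : Int) vis (vis.getLast hne) best,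
               ((mst.modify m.2.2 [] (· ++ [m.2.1])).modify m.2.1 [] (· ++ [m.2.2])),
               (vis ++ [m.2.1]).getLast hne2) from by rw [hlast2]]
        rw [hadd]
        apply ih k' (vis ++ [m.2.1]) _ _ _ hne2
        · -- Nodup
          simp [List.nodup_append, hnd, hvm]
          exact fun a ha h => hvm (h ▸ ha)
        · -- bounds
          intro x hx
          rcases List.mem_append.mp hx with h | h
          · exact hbound x h
          · simp at h; subst h; exact hvr
        · -- length
          rw [List.length_append]
          simp only [List.length_cons, List.length_nil]
          omega
        · -- columns
          intro v h0 hn hv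
          have hvne : v ≠ m.2.1 := fun h => hv (h ▸ List.mem_append_right _ (List.mem_singleton_self _))
          have hvnvis : v ∉ vis := fun h => hv (List.mem_append_left _ h)
          rw [List.filter_append]
          have hcol' : (pool'.filter (fun e => e.2.1 == v)).Perm
              (vis.map (fun u => (Wsym points u v, v, u))) := by
            have hmv : (m.2.1 == v) = false := by
              simp only [beq_eq_false_iff_ne]; omega
            have h1 := hperm.filter (fun e => e.2.1 == v)
            rw [List.filter_cons, hmv] at h1
            simp only [Bool.false_eq_true, if_false] at h1
            exact h1.symm.trans (hcols v h0 hn hvnvis)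
          have hpush : ((((nbrList points (points.length : Int) m.2.1).filter
                (fun vw => !PySem.Set.contains (vis ++ [m.2.1]) vw.1)).map
                (fun vw => ((vw.2, vw.1, m.2.1) : Int × Int × Int))).filter (fun e => e.2.1 == v))
              = [(Wsym points m.2.1 v, v, m.2.1)] := by
            have := push_col points m.2.1 v (vis ++ [m.2.1]) hvr.1 hvr.2 h0 hn hvne
              (by intro hmem; exact hv hmem)
            exact this
          rw [hpush, List.map_append]
          exact hcol'.append (List.Perm.refl _)
        · -- node bounds
          intro e he
          rcases List.mem_append.mp he with h | h
          · exact hnodes e (hperm.mem_iff.mpr (List.mem_cons_of_mem _ h))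
          · obtain ⟨vw, hvw, rfl⟩ := List.mem_map.mp h
            have := mem_nbrList points m.2.1 hvr.1 hvr.2 (List.mem_of_mem_filter hvw)
            exact ⟨this.1, this.2.1⟩
        · -- best characterization
          intro v h0 hn hv
          rw [List.dropLast_concat]
          exact hbest' v h0 hn (fun h => hv (List.mem_append_left _ h))
        · -- fuel
          have hpl : ((((nbrList points (points.length : Int) m.2.1).filter
                (fun vw => !PySem.Set.contains (vis ++ [m.2.1]) vw.1)).map
                (fun vw => ((vw.2, vw.1, m.2.1) : Int × Int × Int))).length : Int)
              ≤ (points.length : Int) := by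
            rw [List.length_map]
            calc ((List.length _ : Nat) : Int) ≤ _ := Int.ofNat_le.mpr (List.length_filter_le _ _)
            _ ≤ (points.length : Int) := nbrList_len points m.2.1 hvr.1 hvr.2
          rw [List.length_append]
          have hmul : ((k' + 1 : Nat) : Int) * (points.length : Int)
              = (k' : Int) * (points.length : Int) + (points.length : Int) := by
            push_cast; ring
          rw [hmul] at hfuel
          push_cast at hfuel ⊢
          omega

theorem mst_eq (points : List (Int × Int)) (hpre : points ≠ []) :
    primMst (buildGraph points) (points.length : Int)
      = ((PySem.List.pyRange 1 (points.length : Int)).foldl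
          (fun st _ => primStepB (distTable points) (points.length : Int) st)
          (PySem.Set.add PySem.Set.empty 0, PySem.Dict.empty, PySem.Dict.empty, (0 : Int))).2.2.1 := by
  have hL : 1 ≤ points.length := List.length_pos_of_ne_nil hpre
  have h0n : (0 : Int) < (points.length : Int) := by exact_mod_cast hL
  -- B's loop is (length - 1) iterations of the step function
  rw [foldl_const (fun st => primStepB (distTable points) (points.length : Int) st)]
  have hrlen : (PySem.List.pyRange 1 (points.length : Int)).length = points.length - 1 := by
    have := length_pyRange 1 (points.length : Int)
    by_cases hc : (1 : Int) < (points.length : Int)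
    · rw [if_pos hc] at this; omega
    · rw [if_neg hc] at this; omega
  rw [hrlen]
  -- A's first iteration pops the seed (0, 0, -1) and pushes node 0's edges
  unfold primMst
  have hfe : (points.length : Int).toNat * (points.length : Int).toNat + (points.length : Int).toNat + 2
      = ((points.length : Int).toNat * (points.length : Int).toNat + (points.length : Int).toNat + 1) + 1 := rfl
  rw [hfe]
  have hpop0 : popMin? [((0 : Int), (0 : Int), (-1 : Int))] = some (((0 : Int), (0 : Int), (-1 : Int)), []) := rfl
  rw [primLoop_visit _ _ _ _ _ _ _ _ (by show (0 : Int) < _; simpa using h0n) hpop0 rfl]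
  have hadd0 : PySem.Set.add (PySem.Set.empty : PySem.Set Int) 0 = [0] := rfl
  rw [hadd0]
  rw [if_neg (by simp)]
  rw [buildGraph_getD points 0 (le_refl 0) h0n, push_fold]
  rw [List.nil_append]
  have hne0 : ([0] : List Int) ≠ [] := by simp
  have hlast0 : ([0] : List Int).getLast hne0 = 0 := rfl
  rw [show ((fun st => primStepB (distTable points) (points.length : Int) st)^[points.length - 1]
        (([0] : List Int), (PySem.Dict.empty : PySem.Dict Int (Int × Int)),
         (PySem.Dict.empty : PySem.Dict Int (List Int)), (0 : Int)))
      = ((fun st => primStepB (distTable points) (points.length : Int) st)^[points.length - 1]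
        (([0] : List Int), PySem.Dict.empty, PySem.Dict.empty, ([0] : List Int).getLast hne0)) from rfl]
  apply main_sim points _ (points.length - 1) [0] _ _ _ hne0
  · simp
  · intro x hx; simp at hx; subst hx; exact ⟨le_refl 0, h0n⟩
  · simp; omega
  · -- columns: each unvisited v has exactly node 0's push in its column
    intro v h0 hn hv
    have hvne : v ≠ 0 := by simp at hv; omega
    rw [push_col points 0 v [0] (le_refl 0) h0n h0 hn hvne (by simpa using hv)]
    exact List.Perm.refl _
  · intro e he
    obtain ⟨vw, hvw, rfl⟩ := List.mem_map.mp he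
    have := mem_nbrList points 0 (le_refl 0) h0n (List.mem_of_mem_filter hvw)
    exact ⟨this.1, this.2.1⟩
  · intro v h0 hn hv
    rw [show ([0] : List Int).dropLast = [] from rfl]
    rw [PySem.Dict.get?_empty]
    rfl
  · -- fuel bound
    have hpl : ((((nbrList points (points.length : Int) 0).filter
          (fun vw => !PySem.Set.contains ([0] : List Int) vw.1)).map
          (fun vw => ((vw.2, vw.1, (0 : Int)) : Int × Int × Int))).length : Int)
        ≤ (points.length : Int) := by
      rw [List.length_map]
      calc ((List.length _ : Nat) : Int) ≤ _ := Int.ofNat_le.mpr (List.length_filter_le _ _)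
      _ ≤ (points.length : Int) := nbrList_len points 0 (le_refl 0) h0n
    have htn : (points.length : Int).toNat = points.length := rfl
    rw [htn]
    have hmul : ((points.length - 1 : Nat) : Int) * (points.length : Int)
        = (points.length : Int) * (points.length : Int) - (points.length : Int) := by
      push_cast [Nat.cast_sub hL]
      ring
    push_cast
    push_cast at hmul hpl
    omega

-- ===== VERDICT (by name: the statement is the Claim_ definition above) =====
theorem approxMTSP_spec : Claim_equal_approxMTSP := by
  unfold Claim_equal_approxMTSP Spec_approxMTSP
  intro points _ hpre
  unfold Pre_approxMTSP at hpre
  simp only [approxMTSP, approxMTSP_alt]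
  rw [mst_eq points hpre]
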